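-- pv_equiv track=rewrite | github.com/Samcool1990/python-practice_files_for_interveiws | CGI_interview_second.py | replace_second_occurrence
-- ===== SOURCE A (Python) =====
-- def replace_second_occurrence(input_string, char):
--     count = 0
--     output_string = ''
--
--     for i in input_string:
--         if i == char:
--             count += 1
--             if count == 2:
--                 output_string += '2'
--             else:
--                 output_string += i
--         else:
--             output_string += i
--
--     return output_string
-- ===== SOURCE B (Python) =====
-- def replace_second_occurrence(input_string, char):
--     indices = [i for i, c in enumerate(input_string) if c == char]
--     if len(indices) < 2:
--         return input_string
--     idx = indices[1]
--     return input_string[:idx] + '2' + input_string[idx + 1:]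
-- ===== Notes on version B (the rewrite author's own statement) =====
-- stated objective: simpler
-- what changed: B locates the index of the second matching character with one enumerate-comprehension and splices the string once by slicing, instead of rebuilding the whole string character by character with a running counter.
import Mathlib
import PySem

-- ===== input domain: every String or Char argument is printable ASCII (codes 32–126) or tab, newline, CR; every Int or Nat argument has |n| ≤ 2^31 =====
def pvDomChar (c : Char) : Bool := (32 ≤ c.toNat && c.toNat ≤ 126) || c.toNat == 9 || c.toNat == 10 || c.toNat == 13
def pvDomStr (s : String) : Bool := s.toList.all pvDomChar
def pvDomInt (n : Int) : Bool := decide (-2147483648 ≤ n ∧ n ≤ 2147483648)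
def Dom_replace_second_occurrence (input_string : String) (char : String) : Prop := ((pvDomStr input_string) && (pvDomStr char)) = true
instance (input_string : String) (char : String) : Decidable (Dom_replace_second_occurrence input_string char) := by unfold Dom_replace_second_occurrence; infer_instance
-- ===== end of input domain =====

-- B replaces the second occurrence by one slice-splice at its index; A rebuilds the string with a counter.
-- ===== PORT A =====
def goA (char : String) (count : Int) : List Char → List Char
  | [] => []
  | c :: rest =>
    if String.ofList [c] == char then
      let count := count + 1
      (if count == 2 then '2' else c) :: goA char count rest
    else
      c :: goA char count rest

def replace_second_occurrence (input_string : String) (char : String) : String :=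
  String.ofList (goA char 0 input_string.toList)


-- ===== PORT B =====
-- zipIdx is Lean's enumerate; take j ++ '2' :: drop (j+1) is s[:idx] + '2' + s[idx+1:] (idx ≥ 0), exact here.
def replace_second_occurrence_alt (input_string : String) (char : String) : String :=
  let l := input_string.toList
  let indices := (l.zipIdx).filterMap (fun p => if String.ofList [p.1] == char then some p.2 else none)
  match indices with
  | _ :: j :: _ => String.ofList (l.take j ++ ['2'] ++ l.drop (j + 1))
  | _ => input_string


-- ===== PRECONDITION & SPEC =====
def Spec_replace_second_occurrence (input_string : String) (char : String) (out : String) : Prop := out = replace_second_occurrence_alt input_string char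
instance (input_string : String) (char : String) (out : String) : Decidable (Spec_replace_second_occurrence input_string char out) := by unfold Spec_replace_second_occurrence; infer_instance

-- ===== CLAIM (what is proved, stated in full; the proofs are below) =====
def Claim_equal_replace_second_occurrence : Prop := ∀ (input_string : String) (char : String), Dom_replace_second_occurrence input_string char → Spec_replace_second_occurrence input_string char (replace_second_occurrence input_string char)

-- ===== LEMMAS AND PROOFS =====

def F (char : String) (n : Nat) (l : List Char) : List Nat :=
  (l.zipIdx n).filterMap (fun p => if String.ofList [p.1] == char then some p.2 else none)

theorem F_cons (char : String) (n : Nat) (c : Char) (l : List Char) :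
    F char n (c :: l) = if String.ofList [c] == char then n :: F char (n+1) l else F char (n+1) l := by
  simp only [F, List.zipIdx_cons, List.filterMap_cons]
  by_cases h : (String.ofList [c] == char) = true <;> simp [h]

theorem F_shift (char : String) (l : List Char) (n : Nat) :
    F char n l = (F char 0 l).map (· + n) := by
  induction l generalizing n with
  | nil => simp [F]
  | cons c l ih =>
    rw [F_cons, F_cons, ih (n+1), ih 1]
    split <;> (simp [List.map_map, Function.comp_def]; intro a _; omega)

theorem goA_ge2 (char : String) (l : List Char) : ∀ k : Int, 2 ≤ k → goA char k l = l := by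
  induction l with
  | nil => intro k hk; simp [goA]
  | cons c l ih =>
    intro k hk
    simp only [goA]
    split
    · have h2 : ¬ (k + 1 == (2:Int)) = true := by simp; omega
      simp [h2, ih (k+1) (by omega)]
    · rw [ih k hk]

theorem goA_one (char : String) (l : List Char) :
    goA char 1 l = (match F char 0 l with
      | j :: _ => l.take j ++ '2' :: l.drop (j + 1)
      | [] => l) := by
  induction l with
  | nil => simp [goA, F]
  | cons c l ih =>
    rw [F_cons, F_shift char l 1]
    simp only [goA]
    by_cases h : (String.ofList [c] == char) = true
    · simp only [h, if_true, show (1:Int)+1 = 2 from by norm_num]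
      simp [goA_ge2 char l 2 (by omega)]
    · simp only [h, Bool.false_eq_true, if_false]
      rw [ih]
      cases hF : F char 0 l with
      | nil => simp
      | cons j t => simp [List.take_succ_cons, List.drop_succ_cons]

theorem goA_zero (char : String) (l : List Char) :
    goA char 0 l = (match F char 0 l with
      | _ :: j :: _ => l.take j ++ '2' :: l.drop (j + 1)
      | _ => l) := by
  induction l with
  | nil => simp [goA, F]
  | cons c l ih =>
    rw [F_cons, F_shift char l 1]
    simp only [goA]
    by_cases h : (String.ofList [c] == char) = true
    · simp only [h, if_true]
      simp only [show (0:Int)+1 = 1 from by norm_num]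
      rw [goA_one]
      cases hF : F char 0 l with
      | nil => simp
      | cons j t => simp [List.take_succ_cons, List.drop_succ_cons]
    · simp only [h, Bool.false_eq_true, if_false]
      rw [ih]
      cases hF : F char 0 l with
      | nil => simp
      | cons j t =>
        cases t with
        | nil => simp
        | cons k t' => simp [List.take_succ_cons, List.drop_succ_cons]

-- ===== VERDICT (by name: the statement is the Claim_ definition above) =====
theorem replace_second_occurrence_spec : Claim_equal_replace_second_occurrence := by
  intro s char _
  show String.ofList (goA char 0 s.toList) = replace_second_occurrence_alt s char
  rw [goA_zero]
  show String.ofList (match F char 0 s.toList with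
      | _ :: j :: _ => s.toList.take j ++ '2' :: s.toList.drop (j + 1)
      | _ => s.toList) =
    (match F char 0 s.toList with
      | _ :: j :: _ => String.ofList (s.toList.take j ++ ['2'] ++ s.toList.drop (j + 1))
      | _ => s)
  cases hF : F char 0 s.toList with
  | nil => simp
  | cons a t => cases t <;> simp
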